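-- pv_equiv track=rewrite | github.com/pipeshub-ai/pipeshub-ai | backend/python/app/agents/actions/image_generator/image_generator.py | _sanitize_file_stem
-- ===== SOURCE A (Python) =====
-- def _sanitize_file_stem(raw: str | None) -> str:
--     """Normalise a user / LLM supplied file-name stem to a safe snake_case token.
--
--     Returns an empty string when the input is None/empty or produces nothing
--     meaningful after sanitisation. The caller is expected to fall back to a
--     model-based default in that case.
--     """
--     if not raw:
--         return ""
--     cleaned = "".join(
--         c if c.isalnum() or c in {"-", "_"} else "_" for c in raw.strip()
--     ).strip("_-").lower()
--     if not cleaned: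
--         return ""
--     # Collapse runs of underscores and hyphens so "a___b---c" -> "a_b-c".
--     out: list[str] = []
--     prev = ""
--     for ch in cleaned:
--         if ch in {"_", "-"} and prev in {"_", "-"}:
--             continue
--         out.append(ch)
--         prev = ch
--     return "".join(out)[:60].strip("_-")
-- ===== SOURCE B (Python) =====
-- def _sanitize_file_stem(raw):
--     """Same sanitisation, but the collapse is a run tokenizer: the cleaned
--     string is cut into maximal runs of separators / non-separators, each
--     separator run contributes only its first character, and the pieces are
--     re-joined."""
--     if not raw:
--         return ""
--     cleaned = "".join(
--         c if c.isalnum() or c in {"-", "_"} else "_" for c in raw.strip()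
--     ).strip("_-").lower()
--     if not cleaned:
--         return ""
--     seps = "_-"
--     pieces = []
--     i = 0
--     n = len(cleaned)
--     while i < n:
--         j = i
--         if cleaned[i] in seps:
--             while j < n and cleaned[j] in seps:
--                 j += 1
--             pieces.append(cleaned[i])  # a separator run collapses to its first char
--         else:
--             while j < n and cleaned[j] not in seps:
--                 j += 1
--             pieces.append(cleaned[i:j])  # a word run is kept whole
--         i = j
--     return "".join(pieces)[:60].strip("_-")
-- ===== Notes on version B (the rewrite author's own statement) =====
-- stated objective: alternative
-- what changed: The collapse pass is rewritten as a run tokenizer: the cleaned string is cut into maximal separator/non-separator runs with inner index scans, each separator run contributes only its first character and word runs are appended whole, instead of A's per-character loop carrying the previously appended character.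
import Mathlib
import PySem

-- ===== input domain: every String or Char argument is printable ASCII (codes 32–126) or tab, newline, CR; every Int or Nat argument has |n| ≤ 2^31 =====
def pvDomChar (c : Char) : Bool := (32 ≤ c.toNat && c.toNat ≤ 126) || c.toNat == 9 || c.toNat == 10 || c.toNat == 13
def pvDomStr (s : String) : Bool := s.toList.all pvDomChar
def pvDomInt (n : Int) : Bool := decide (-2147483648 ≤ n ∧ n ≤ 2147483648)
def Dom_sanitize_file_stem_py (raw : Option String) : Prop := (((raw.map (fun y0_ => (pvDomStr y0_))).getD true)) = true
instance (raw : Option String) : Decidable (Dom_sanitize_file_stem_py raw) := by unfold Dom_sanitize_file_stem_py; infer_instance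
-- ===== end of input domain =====

-- B replaces A's per-character prev-carrying collapse loop by a run tokenizer
-- (maximal separator/word runs; a separator run contributes its first char);
-- alternative decomposition, same cost.

-- ===== PORT A =====
-- the collapse loop's step: state = (out, prev); Python's initial prev = "" modelled as none
def pvStepA (st : List Char × Option Char) (ch : Char) : List Char × Option Char :=
  if (ch == '_' || ch == '-') &&
     (match st.2 with | some p => p == '_' || p == '-' | none => false) then st
  else (st.1 ++ [ch], some ch)

def sanitize_file_stem_py (raw : Option String) : String :=
  match raw with
  | none => ""
  | some s =>
    if s.toList.isEmpty then "" else
    let cleaned := PySem.Chars.lower (PySem.Chars.stripChars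
      ((PySem.Chars.strip s.toList).map
        (fun c => if PySem.Chars.isalnum c || c == '-' || c == '_' then c else '_'))
      ['_', '-'])
    if cleaned.isEmpty then "" else
    let out := List.foldl pvStepA ([], none) cleaned
    String.ofList (PySem.Chars.stripChars (PySem.Chars.slice out.1 none (some 60)) ['_', '-'])

-- ===== PORT B =====
-- Source B's membership test `c in "_-"`
def pvSepB (c : Char) : Bool := c == '_' || c == '-'

-- Source B's index scan: each step consumes one maximal run (the inner while loops
-- = takeWhile/dropWhile at the current position) and emits its piece
def pvRunsB : List Char → List Char
  | [] => []
  | c :: cs =>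
    if pvSepB c then
      c :: pvRunsB (cs.dropWhile pvSepB)
    else
      (c :: cs.takeWhile (fun x => !pvSepB x)) ++ pvRunsB (cs.dropWhile (fun x => !pvSepB x))
termination_by l => l.length
decreasing_by
  · exact Nat.lt_succ_of_le (List.length_dropWhile_le _ _)
  · exact Nat.lt_succ_of_le (List.length_dropWhile_le _ _)

def sanitize_file_stem_py_alt (raw : Option String) : String :=
  match raw with
  | none => ""
  | some s =>
    if s.toList.isEmpty then "" else
    let cleaned := PySem.Chars.lower (PySem.Chars.stripChars
      ((PySem.Chars.strip s.toList).map
        (fun c => if PySem.Chars.isalnum c || c == '-' || c == '_' then c else '_'))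
      ['_', '-'])
    if cleaned.isEmpty then "" else
    let collapsed := pvRunsB cleaned
    String.ofList (PySem.Chars.stripChars (PySem.Chars.slice collapsed none (some 60)) ['_', '-'])

-- ===== PRECONDITION & SPEC =====
def Spec_sanitize_file_stem_py (raw : Option String) (out : String) : Prop := out = sanitize_file_stem_py_alt raw
instance (raw : Option String) (out : String) : Decidable (Spec_sanitize_file_stem_py raw out) := by unfold Spec_sanitize_file_stem_py; infer_instance

-- ===== CLAIM (what is proved, stated in full; the proofs are below) =====
def Claim_equal_sanitize_file_stem_py : Prop := ∀ (raw : Option String), Dom_sanitize_file_stem_py raw → Spec_sanitize_file_stem_py raw (sanitize_file_stem_py raw)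

-- ===== LEMMAS AND PROOFS =====
-- reference collapse: keep c unless c is a separator and the previous cleaned char was one
def pvG (b : Bool) : List Char → List Char
  | [] => []
  | c :: cs => if pvSepB c && b then pvG (pvSepB c) cs else c :: pvG (pvSepB c) cs

def pvPrevSep : Option Char → Bool
  | some p => pvSepB p
  | none => false

theorem pvStepA_eq (acc : List Char) (prev : Option Char) (c : Char) :
    pvStepA (acc, prev) c =
      if pvSepB c && pvPrevSep prev then (acc, prev) else (acc ++ [c], some c) := by
  cases prev <;> rfl

theorem pvA_eq_g (cs : List Char) : ∀ (acc : List Char) (prev : Option Char),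
    (List.foldl pvStepA (acc, prev) cs).1 = acc ++ pvG (pvPrevSep prev) cs := by
  induction cs with
  | nil => intro acc prev; simp [pvG]
  | cons c cs ih =>
    intro acc prev
    rw [List.foldl_cons, pvStepA_eq]
    by_cases h : (pvSepB c && pvPrevSep prev) = true
    · rw [if_pos h, ih]
      obtain ⟨hc, hp⟩ := Bool.and_eq_true_iff.mp h
      rw [hp]
      simp [pvG, hc]
    · have h' : (pvSepB c && pvPrevSep prev) = false := Bool.eq_false_iff.mpr h
      rw [if_neg h, ih]
      have hps : pvPrevSep (some c) = pvSepB c := rfl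
      rw [hps]
      simp [pvG, h']

-- skipping a leading separator run: pvG true drops seps then behaves like pvG false
theorem pvG_true_dropWhile (cs : List Char) :
    pvG true cs = pvG false (cs.dropWhile pvSepB) := by
  induction cs with
  | nil => rfl
  | cons c cs ih =>
    by_cases hc : pvSepB c = true
    · simp [pvG, hc, ih]
    · have hc' : pvSepB c = false := Bool.eq_false_iff.mpr hc
      simp [pvG, hc']

-- a word prefix passes through pvG false unchanged
theorem pvG_false_word (w rest : List Char) (hw : ∀ x ∈ w, pvSepB x = false) :
    pvG false (w ++ rest) = w ++ pvG false rest := by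
  induction w with
  | nil => rfl
  | cons c w ih =>
    have hc := hw c (by simp)
    simp only [List.cons_append, pvG, hc, Bool.false_and, Bool.false_eq_true, if_false]
    rw [ih (fun x hx => hw x (by simp [hx]))]

-- B's run tokenizer computes the reference collapse
theorem pvB_eq_g (cs : List Char) : pvRunsB cs = pvG false cs := by
  induction cs using pvRunsB.induct with
  | case1 => simp [pvRunsB, pvG]
  | case2 c cs hc ih =>
    rw [pvRunsB, if_pos hc, ih, ← pvG_true_dropWhile]
    simp [pvG, hc]
  | case3 c cs hc ih =>
    have hc' : pvSepB c = false := Bool.eq_false_iff.mpr hc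
    rw [pvRunsB, if_neg hc, ih]
    conv_rhs => rw [show c :: cs
      = (c :: cs.takeWhile (fun x => !pvSepB x)) ++ cs.dropWhile (fun x => !pvSepB x) from by
        simp [List.takeWhile_append_dropWhile]]
    rw [pvG_false_word]
    intro x hx
    rcases List.mem_cons.mp hx with h | h
    · subst h; exact hc'
    · have := List.mem_takeWhile_imp h
      simpa using this

-- ===== VERDICT (by name: the statement is the Claim_ definition above) =====
theorem sanitize_file_stem_py_spec : Claim_equal_sanitize_file_stem_py := by
  intro raw _
  unfold Spec_sanitize_file_stem_py sanitize_file_stem_py sanitize_file_stem_py_alt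
  cases raw with
  | none => rfl
  | some s =>
    by_cases hs : s.toList.isEmpty
    · simp [hs]
    · simp only [hs, Bool.false_eq_true, if_false]
      set cleaned := PySem.Chars.lower (PySem.Chars.stripChars
        ((PySem.Chars.strip s.toList).map
          (fun c => if PySem.Chars.isalnum c || c == '-' || c == '_' then c else '_'))
        ['_', '-']) with hcl
      by_cases hc : cleaned.isEmpty
      · simp [hc]
      · simp only [hc, Bool.false_eq_true, if_false]
        have hA := pvA_eq_g cleaned [] none
        have hB := pvB_eq_g cleaned
        rw [hA, hB]
        rfl
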